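-- pv_equiv track=rewrite | github.com/lemin0x/TP-python-DSA- | tp0.py | conct
-- ===== SOURCE A (Python) =====
-- def conct(lst1, lst2):
--     if not lst1:
--         return lst2[:]
--     elif not lst2:
--         return lst1[:]
--     else :
--         e = lst1.pop()
--         lst2.append(e)
--         conct(lst1, lst2)
--         return lst2
-- ===== SOURCE B (Python) =====
-- def conct(lst1, lst2):
--     if not lst1:
--         return lst2[:]
--     if not lst2:
--         return lst1[:]
--     lst2 += reversed(lst1)
--     lst1.clear()
--     return lst2
-- ===== Notes on version B (the rewrite author's own statement) =====
-- stated objective: simpler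
-- what changed: Replaces the one-element-per-call tail recursion with a single bulk extend of lst2 by reversed(lst1) (plus lst1.clear() for the same net mutation), removing recursion entirely.
import Mathlib
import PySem

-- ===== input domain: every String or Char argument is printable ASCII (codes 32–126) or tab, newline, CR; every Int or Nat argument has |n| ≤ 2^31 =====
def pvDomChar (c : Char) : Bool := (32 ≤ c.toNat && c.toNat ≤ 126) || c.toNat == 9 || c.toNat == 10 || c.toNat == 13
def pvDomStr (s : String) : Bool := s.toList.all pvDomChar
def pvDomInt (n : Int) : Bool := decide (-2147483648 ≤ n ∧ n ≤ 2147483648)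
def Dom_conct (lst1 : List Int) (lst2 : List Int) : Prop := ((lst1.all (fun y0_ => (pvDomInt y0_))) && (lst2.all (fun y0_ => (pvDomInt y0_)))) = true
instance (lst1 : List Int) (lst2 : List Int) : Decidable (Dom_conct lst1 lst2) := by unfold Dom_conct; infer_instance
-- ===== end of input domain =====

-- B replaces A's one-element-per-call tail recursion with a single bulk append of
-- lst1 reversed onto lst2 (objective: simpler). A and B perform the same net
-- mutations in Python (lst1 emptied, lst2 extended, same object returned);
-- the theorems here are about the return value.


-- ===== PORT A =====
-- A pops the last element of lst1, appends it to lst2, and recurses; the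
-- recursive call's value equals the mutated lst2 that A returns.
def conct (lst1 : List Int) (lst2 : List Int) : List Int :=
  if lst1 = [] then lst2
  else if lst2 = [] then lst1
  else conct lst1.dropLast (lst2 ++ [lst1.getLast!])
termination_by lst1.length
decreasing_by
  have h : lst1 ≠ [] := by assumption
  simpa [List.length_dropLast] using Nat.sub_lt (List.length_pos_iff.mpr h) Nat.one_pos

-- ===== PORT B =====
-- after the two guards, B does 'lst2 += reversed(lst1)' in one step.
def conct_alt (lst1 : List Int) (lst2 : List Int) : List Int :=
  if lst1 = [] then lst2
  else if lst2 = [] then lst1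
  else lst2 ++ lst1.reverse

-- ===== PRECONDITION & SPEC =====
def Spec_conct (lst1 : List Int) (lst2 : List Int) (out : List Int) : Prop := out = conct_alt lst1 lst2
instance (lst1 : List Int) (lst2 : List Int) (out : List Int) : Decidable (Spec_conct lst1 lst2 out) := by unfold Spec_conct; infer_instance

-- ===== CLAIM (what is proved, stated in full; the proofs are below) =====
def Claim_equal_conct : Prop := ∀ (lst1 : List Int) (lst2 : List Int), Dom_conct lst1 lst2 → Spec_conct lst1 lst2 (conct lst1 lst2)

-- ===== LEMMAS AND PROOFS =====

-- getLast! of a list ending in y is y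
theorem getLast!_append_singleton (y : Int) : ∀ ys : List Int, (ys ++ [y]).getLast! = y := by
  intro ys
  induction ys with
  | nil => rfl
  | cons a tl ih =>
    cases tl with
    | nil => rfl
    | cons b tl2 => simp [List.getLast!, List.getLast] at ih ⊢

-- on the main path (both lists non-empty) A computes lst2 ++ reverse lst1
theorem conct_main (lst1 : List Int) : ∀ (lst2 : List Int), lst1 ≠ [] → lst2 ≠ [] →
    conct lst1 lst2 = lst2 ++ lst1.reverse := by
  induction lst1 using List.reverseRecOn with
  | nil => intro lst2 h; exact absurd rfl h
  | append_singleton ys y ih =>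
    intro lst2 _ h2
    rw [conct]
    rw [if_neg (by simp), if_neg h2]
    rw [List.dropLast_concat, getLast!_append_singleton y ys]
    by_cases hys : ys = []
    · subst hys; simp [conct]
    · rw [ih (lst2 ++ [y]) hys (by simp)]
      simp

-- ===== VERDICT (by name: the statement is the Claim_ definition above) =====
theorem conct_spec : Claim_equal_conct := by
  intro lst1 lst2 _
  unfold Spec_conct conct_alt
  by_cases h1 : lst1 = []
  · subst h1; simp [conct]
  · by_cases h2 : lst2 = []
    · subst h2; rw [conct]; simp [h1]
    · rw [if_neg h1, if_neg h2]
      exact conct_main lst1 lst2 h1 h2
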